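-- pv_equiv track=rewrite | github.com/dementive/Victoria3Tools | src/game_objects.py | write_syntax
-- ===== SOURCE A (Python) =====
-- def write_syntax(li, header, scope):
--     count = 0
--     string = f"\n    # Generated {header}\n    - match: \\b("
--     for i in li:
--         count += 1
--         # Count is needed to split because columns are waaay too long for syntax regex
--         if count == 0:
--             string = f")\\b\n      scope: {scope}\n"
--             string += f"    # Generated {header}\n    - match: \\b({i}|"
--         elif count == 75:
--             string += f")\\b\n      scope: {scope}\n"
--             string += f"    # Generated {header}\n    - match: \\b({i}|"
--             count = 1
--         else:
--             string += f"{i}|"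
--     string += f")\\b\n      scope: {scope}"
--     return string
-- ===== SOURCE B (Python) =====
-- def write_syntax(li, header, scope):
--     # chunk into blocks: first 74 tokens, then 74 per block (counter resets at 75)
--     chunks = [li[i:i + 74] for i in range(0, len(li), 74)]
--     sep = f")\\b\n      scope: {scope}\n    # Generated {header}\n    - match: \\b("
--     body = sep.join("|".join(c) + "|" for c in chunks)
--     return f"\n    # Generated {header}\n    - match: \\b(" + body + f")\\b\n      scope: {scope}"
-- ===== Notes on version B (the rewrite author's own statement) =====
-- stated objective: simpler
-- what changed: Replaces A's stateful counter-and-append loop with a declarative chunk-then-join: slice the token list into blocks of 74, '|'.join each block, and join the blocks with the close/reopen separator.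
import Mathlib
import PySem

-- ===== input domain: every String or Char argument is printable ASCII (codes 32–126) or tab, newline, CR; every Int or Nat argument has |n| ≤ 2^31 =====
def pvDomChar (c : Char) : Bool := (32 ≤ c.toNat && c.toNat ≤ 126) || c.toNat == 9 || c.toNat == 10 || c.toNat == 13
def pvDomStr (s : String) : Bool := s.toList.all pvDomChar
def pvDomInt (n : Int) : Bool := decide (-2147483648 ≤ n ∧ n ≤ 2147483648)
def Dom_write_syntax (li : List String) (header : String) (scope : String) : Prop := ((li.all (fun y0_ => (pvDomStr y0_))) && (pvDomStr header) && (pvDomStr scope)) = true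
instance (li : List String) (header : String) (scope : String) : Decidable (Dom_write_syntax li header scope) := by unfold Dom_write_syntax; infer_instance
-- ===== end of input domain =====

-- B replaces A's counter-driven appending loop with chunk-the-list-then-join assembly (simpler decomposition).

-- ===== PORT A =====
-- literal transliteration of A's loop body: state (count, string), branches in source order
def write_syntax_step (header : String) (scope : String) (st : Int × String) (i : String) : Int × String :=
  let count := st.1 + 1
  if count = 0 then
    (count, ")\\b\n      scope: " ++ scope ++ "\n" ++ "    # Generated " ++ header ++ "\n    - match: \\b(" ++ i ++ "|")
  else if count = 75 then
    (1, st.2 ++ ")\\b\n      scope: " ++ scope ++ "\n" ++ "    # Generated " ++ header ++ "\n    - match: \\b(" ++ i ++ "|")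
  else
    (count, st.2 ++ i ++ "|")

def write_syntax (li : List String) (header : String) (scope : String) : String :=
  (li.foldl (write_syntax_step header scope)
      (0, "\n    # Generated " ++ header ++ "\n    - match: \\b(")).2
    ++ ")\\b\n      scope: " ++ scope

-- ===== PORT B =====
-- exact port of Python's sep.join(parts): "" on [], otherwise parts interleaved with sep
def pyJoin (sep : String) : List String → String
  | [] => ""
  | [a] => a
  | a :: b :: rest => a ++ sep ++ pyJoin sep (b :: rest)

-- the chunks [li[i:i+74] for i in range(0, len(li), 74)]
def chunk74 : List String → List (List String)
  | [] => []
  | x :: xs => (x :: xs.take 73) :: chunk74 (xs.drop 73)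
termination_by l => l.length
decreasing_by simp

def write_syntax_alt (li : List String) (header : String) (scope : String) : String :=
  "\n    # Generated " ++ header ++ "\n    - match: \\b("
    ++ pyJoin (")\\b\n      scope: " ++ scope ++ "\n    # Generated " ++ header ++ "\n    - match: \\b(")
         ((chunk74 li).map (fun c => pyJoin "|" c ++ "|"))
    ++ ")\\b\n      scope: " ++ scope

-- ===== PRECONDITION & SPEC =====
def Spec_write_syntax (li : List String) (header : String) (scope : String) (out : String) : Prop := out = write_syntax_alt li header scope
instance (li : List String) (header : String) (scope : String) (out : String) : Decidable (Spec_write_syntax li header scope out) := by unfold Spec_write_syntax; infer_instance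

-- ===== CLAIM (what is proved, stated in full; the proofs are below) =====
def Claim_equal_write_syntax : Prop := ∀ (li : List String) (header : String) (scope : String), Dom_write_syntax li header scope → Spec_write_syntax li header scope (write_syntax li header scope)

-- ===== LEMMAS AND PROOFS =====

-- rendering the tail of A's output, given remaining capacity of the current block
def renderFrom (sep : String) : Nat → List String → String
  | _, [] => ""
  | 0, x :: xs => sep ++ x ++ "|" ++ renderFrom sep 73 xs
  | k + 1, x :: xs => x ++ "|" ++ renderFrom sep k xs

def joinBars (ys : List String) : String := ys.foldr (fun y r => y ++ "|" ++ r) ""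

theorem renderFrom_take_drop (sep : String) (j : Nat) (xs : List String) :
    renderFrom sep j xs = joinBars (xs.take j) ++ renderFrom sep 0 (xs.drop j) := by
  induction j generalizing xs with
  | zero => simp [joinBars]
  | succ k ih =>
    cases xs with
    | nil => simp [renderFrom, joinBars]
    | cons x xs =>
      simp [renderFrom, joinBars, ih xs, String.append_assoc]

theorem pyJoin_bar_cons (x : String) (ys : List String) :
    pyJoin "|" (x :: ys) ++ "|" = x ++ "|" ++ joinBars ys := by
  induction ys generalizing x with
  | nil => simp [pyJoin, joinBars]
  | cons y ys ih =>
    rw [show pyJoin "|" (x :: y :: ys) = x ++ "|" ++ pyJoin "|" (y :: ys) from rfl]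
    rw [String.append_assoc, String.append_assoc, String.append_assoc, ← String.append_assoc, ih y]
    simp [joinBars, String.append_assoc]

theorem chunk74_render (sep : String) (li : List String) :
    pyJoin sep ((chunk74 li).map (fun c => pyJoin "|" c ++ "|")) = renderFrom sep 74 li := by
  induction hn : li.length using Nat.strong_induction_on generalizing li with
  | _ n ih =>
    cases li with
    | nil => simp [chunk74, renderFrom, pyJoin]
    | cons x xs =>
      rw [chunk74]
      rw [show renderFrom sep 74 (x :: xs) = x ++ "|" ++ renderFrom sep 73 xs from rfl,
          renderFrom_take_drop sep 73 xs]
      cases hd : xs.drop 73 with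
      | nil =>
        rw [show chunk74 ([] : List String) = [] from by rw [chunk74]]
        simp only [List.map_cons, List.map_nil]
        rw [show pyJoin sep [pyJoin "|" (x :: xs.take 73) ++ "|"] = pyJoin "|" (x :: xs.take 73) ++ "|" from rfl]
        rw [pyJoin_bar_cons]
        simp [renderFrom, String.append_assoc]
      | cons y ys =>
        have hlen : (xs.drop 73).length < n := by
          subst hn; simp
        have ihd := ih _ hlen (xs.drop 73) rfl
        rw [hd] at ihd
        have hne : ∃ a as, (chunk74 (y :: ys)).map (fun c => pyJoin "|" c ++ "|") = a :: as := by
          rw [chunk74]; exact ⟨_, _, rfl⟩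
        obtain ⟨a, as, hm⟩ := hne
        rw [List.map_cons, hm]
        rw [show pyJoin sep ((pyJoin "|" (x :: xs.take 73) ++ "|") :: a :: as) = (pyJoin "|" (x :: xs.take 73) ++ "|") ++ sep ++ pyJoin sep (a :: as) from rfl]
        rw [← hm, ihd, pyJoin_bar_cons]
        rw [show renderFrom sep 0 (y :: ys) = sep ++ y ++ "|" ++ renderFrom sep 73 ys from rfl,
            show renderFrom sep 74 (y :: ys) = y ++ "|" ++ renderFrom sep 73 ys from rfl]
        simp [String.append_assoc]

theorem loop_eq (header scope : String) (rest : List String) :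
    ∀ (c : Int) (s : String), 0 ≤ c → c ≤ 74 →
      (rest.foldl (write_syntax_step header scope) (c, s)).2 =
        s ++ renderFrom (")\\b\n      scope: " ++ scope ++ "\n    # Generated " ++ header ++ "\n    - match: \\b(") (74 - c).toNat rest := by
  induction rest with
  | nil => intro c s _ _; simp [renderFrom]
  | cons x xs ih =>
    intro c s h0 h74
    by_cases hc : c = 74
    · subst hc
      have hstep : write_syntax_step header scope (74, s) x =
          (1, s ++ ")\\b\n      scope: " ++ scope ++ "\n" ++ "    # Generated " ++ header ++ "\n    - match: \\b(" ++ x ++ "|") := by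
        simp [write_syntax_step]
      rw [List.foldl_cons, hstep, ih 1 _ (by omega) (by omega)]
      rw [show ((74 : Int) - 74).toNat = 0 from rfl, show ((74 : Int) - 1).toNat = 73 from rfl]
      simp [renderFrom, String.append_assoc]
    · have h1 : ¬(c + 1 = 0) := by omega
      have h2 : ¬(c + 1 = 75) := by omega
      have hstep : write_syntax_step header scope (c, s) x = (c + 1, s ++ x ++ "|") := by
        simp [write_syntax_step, h1, h2]
      rw [List.foldl_cons, hstep, ih (c + 1) _ (by omega) (by omega)]
      have hk : (74 - c).toNat = (74 - (c + 1)).toNat + 1 := by omega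
      rw [hk]
      simp [renderFrom, String.append_assoc]

-- ===== VERDICT (by name: the statement is the Claim_ definition above) =====
theorem write_syntax_spec : Claim_equal_write_syntax := by
  intro li header scope _
  unfold Spec_write_syntax write_syntax write_syntax_alt
  rw [loop_eq header scope li 0 _ (by omega) (by omega), chunk74_render]
  simp [String.append_assoc]
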